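-- pv_equiv track=rewrite | github.com/ErikTanis/AdventOfCode2023 | day7/code.py | get_points2
-- ===== SOURCE A (Python) =====
-- def get_points1(hand: str) -> int:
--     if hand.count(hand[0]) == 5:
--         return 1
--     hand = sorted(hand, key=hand.count, reverse=True)
--     for card in hand:
--         if hand.count(card) == 4:
--             return 2
--         elif hand.count(card) == 3:
--             if len(set(hand)) == 2:
--                 return 3
--             else:
--                 return 4
--         elif hand.count(card) == 2:
--             if len(set(hand)) == 3:
--                 return 5
--             else:
--                 return 6
--         return 7
--
-- def get_points2(hand: str) -> list:
--     if 'J' not in hand: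
--         return [get_points1(hand)]
--     points = []
--     cards = ['A', 'K', 'Q', 'T', '9', '8', '7', '6', '5', '4', '3', '2']
--     for card in cards:
--         new_hand = hand.replace('J', card, 1)
--         points.extend(get_points2(new_hand))
--     return points
-- ===== SOURCE B (Python) =====
-- from itertools import product
--
--
-- def get_points1(hand: str) -> int:
--     if hand.count(hand[0]) == 5:
--         return 1
--     m = max(hand.count(c) for c in hand)
--     d = len(set(hand))
--     if m == 4:
--         return 2
--     if m == 3:
--         return 3 if d == 2 else 4
--     if m == 2:
--         return 5 if d == 3 else 6
--     return 7
--
--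
-- def get_points2(hand: str) -> list:
--     cards = ['A', 'K', 'Q', 'T', '9', '8', '7', '6', '5', '4', '3', '2']
--     n = hand.count('J')
--     points = []
--     for combo in product(cards, repeat=n):
--         it = iter(combo)
--         new_hand = ''.join(next(it) if ch == 'J' else ch for ch in hand)
--         points.append(get_points1(new_hand))
--     return points
-- ===== Notes on version B (the rewrite author's own statement) =====
-- stated objective: alternative
-- what changed: get_points2's recursion (replace the first 'J', recurse, concatenate) is replaced by one iteration over itertools.product(cards, repeat=hand.count('J')) that fills the jokers left-to-right, and get_points1's sort-then-inspect classifier by a direct max-count/distinct-count classifier.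
-- outside the precondition, e.g. on get_points2(''): A raises IndexError, B raises IndexError
import Mathlib
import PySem

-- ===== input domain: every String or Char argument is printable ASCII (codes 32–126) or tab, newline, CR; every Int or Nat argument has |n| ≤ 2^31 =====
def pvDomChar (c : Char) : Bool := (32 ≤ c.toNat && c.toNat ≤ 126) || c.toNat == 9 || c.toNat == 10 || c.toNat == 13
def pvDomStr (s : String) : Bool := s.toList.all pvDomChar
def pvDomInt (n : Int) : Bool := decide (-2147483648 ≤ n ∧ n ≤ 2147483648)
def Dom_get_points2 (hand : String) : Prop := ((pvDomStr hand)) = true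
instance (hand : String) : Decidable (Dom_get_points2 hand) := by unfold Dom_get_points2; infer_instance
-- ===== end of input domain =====

-- B replaces A's recursive one-joker-at-a-time substitution by a single iteration over all
-- joker-substitution tuples (cartesian product), and A's sort-based hand classifier by a
-- max-count/distinct-count classifier (objective: alternative decomposition, not faster).

-- ===== PORT A =====
def pvCards : List Char := ['A', 'K', 'Q', 'T', '9', '8', '7', '6', '5', '4', '3', '2']

-- port of get_points1: the for-loop's body ends in `return`, so it only ever inspects the
-- first element of the sorted list; the two `0` branches are where Python raises IndexError /
-- returns None (only the empty hand, excluded by Pre_)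
def pvGp1 (cs : List Char) : Int :=
  match PySem.List.pyGet? cs 0 with
  | none => 0      -- hand[0]: IndexError on the empty hand (outside Pre_)
  | some c0 =>
    if cs.count c0 = 5 then 1
    else
      -- hand = sorted(hand, key=hand.count, reverse=True)
      match PySem.List.sorted cs (fun c => cs.count c) true with
      | [] => 0    -- loop body never runs, Python returns None (unreachable: cs ≠ [])
      | card :: rest =>
        if (card :: rest).count card = 4 then 2
        else if (card :: rest).count card = 3 then
          if (PySem.Set.ofList (card :: rest)).length = 2 then 3 else 4
        else if (card :: rest).count card = 2 then
          if (PySem.Set.ofList (card :: rest)).length = 3 then 5 else 6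
        else 7

-- exact port of hand.replace('J', card, 1) for the single-character pattern 'J'
def pvReplace1 (card : Char) : List Char → List Char
  | [] => []
  | c :: cs => if c = 'J' then card :: cs else c :: pvReplace1 card cs

-- termination fact for pvGo (cited in decreasing_by)
theorem pvReplace1_count_lt (card : Char) (cs : List Char) (hm : 'J' ∈ cs)
    (hc : card ≠ 'J') : (pvReplace1 card cs).count 'J' < cs.count 'J' := by
  induction cs with
  | nil => cases hm
  | cons a t ih =>
    by_cases ha : a = 'J'
    · subst ha
      simp [pvReplace1, hc]
    · rcases List.mem_cons.mp hm with h | h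
      · exact absurd h.symm ha
      · have := ih h
        simp [pvReplace1, ha]
        omega

theorem pvCards_ne_J : ∀ c ∈ pvCards, c ≠ 'J' := by
  intro c hc
  fin_cases hc <;> decide

def pvGo (cs : List Char) : List Int :=
  if hJ : PySem.Chars.isIn ['J'] cs = true then
    -- for card in cards: points.extend(get_points2(hand.replace('J', card, 1)))
    pvCards.attach.foldl (fun pts card => pts ++ pvGo (pvReplace1 card.val cs)) []
  else
    [pvGp1 cs]
termination_by cs.count 'J'
decreasing_by
  have hm : 'J' ∈ cs :=
    (List.singleton_infix_iff _ _).mp ((PySem.Chars.isIn_iff_infix _ _).mp hJ)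
  exact pvReplace1_count_lt card.val cs hm (pvCards_ne_J card.val card.property)

def get_points2 (hand : String) : List Int := pvGo hand.toList

-- ===== PORT B =====
def pvCardsB : List Char := ['A', 'K', 'Q', 'T', '9', '8', '7', '6', '5', '4', '3', '2']

-- port of B's get_points1: m = max(hand.count(c) for c in hand), d = len(set(hand))
def pvGp1Alt (cs : List Char) : Int :=
  match PySem.List.pyGet? cs 0 with
  | none => 0      -- hand[0]: IndexError on the empty hand (outside Pre_)
  | some c0 =>
    if cs.count c0 = 5 then 1
    else
      -- max(...) raises only on the empty hand (outside Pre_); the getD 0 is unreachable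
      let m := (PySem.List.max? (cs.map fun c => (cs.count c : Int)) (fun x => x)).getD 0
      let d := (PySem.Set.ofList cs).length
      if m = 4 then 2
      else if m = 3 then (if d = 2 then 3 else 4)
      else if m = 2 then (if d = 3 then 5 else 6)
      else 7

-- itertools.product(cards, repeat=n), tuples as lists, first coordinate varying slowest
def pvProduct (cards : List Char) : Nat → List (List Char)
  | 0 => [[]]
  | n + 1 => cards.flatMap fun c => (pvProduct cards n).map (c :: ·)

-- ''.join(next(it) if ch == 'J' else ch for ch in hand); the exhausted-iterator branch
-- (subs = [] at a 'J') is unreachable, since len(combo) = number of 'J's in the hand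
def pvFill : List Char → List Char → List Char
  | [], _ => []
  | c :: cs, subs =>
    if c = 'J' then
      match subs with
      | s :: rest => s :: pvFill cs rest
      | [] => c :: pvFill cs []
    else c :: pvFill cs subs

def get_points2_alt (hand : String) : List Int :=
  (pvProduct pvCardsB (PySem.Chars.count hand.toList ['J'])).map fun combo =>
    pvGp1Alt (pvFill hand.toList combo)

-- ===== PRECONDITION & SPEC =====
-- Pre_ excludes only the empty hand, on which A's get_points1 raises IndexError (hand[0]).
def Pre_get_points2 (hand : String) : Prop := hand ≠ ""
instance (hand : String) : Decidable (Pre_get_points2 hand) := by unfold Pre_get_points2; infer_instance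
def pvWitness_get_points2 : String := "32TJK"

def Spec_get_points2 (hand : String) (out : List Int) : Prop := out = get_points2_alt hand
instance (hand : String) (out : List Int) : Decidable (Spec_get_points2 hand out) := by unfold Spec_get_points2; infer_instance

-- ===== CLAIM (what is proved, stated in full; the proofs are below) =====
def Claim_equal_get_points2 : Prop := ∀ (hand : String), Dom_get_points2 hand → Pre_get_points2 hand → Spec_get_points2 hand (get_points2 hand)

-- ===== LEMMAS AND PROOFS =====

theorem pvCount_go_singleton (l : List Char) : ∀ (fuel acc : Nat), l.length ≤ fuel →
    PySem.Chars.count.go ['J'] fuel l acc = acc + l.count 'J' := by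
  induction l with
  | nil => intro fuel acc _; cases fuel <;> simp [PySem.Chars.count.go]
  | cons a t ih =>
    intro fuel acc h
    cases fuel with
    | zero => simp at h
    | succ f =>
      have hf : t.length ≤ f := by simp at h; omega
      by_cases ha : a = 'J'
      · subst ha
        simp only [PySem.Chars.count.go, List.isPrefixOf, BEq.rfl, Bool.true_and,
          if_true, List.length_singleton, List.drop_succ_cons, List.drop_zero]
        rw [ih f (acc + 1) hf]
        simp
        omega
      · have hpre : ¬ (['J'].isPrefixOf (a :: t) = true) := by
          simp [List.isPrefixOf]
          intro hh
          exact absurd hh.symm ha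
        simp only [PySem.Chars.count.go, if_neg hpre]
        rw [ih f acc hf]
        simp [ha]

theorem pvCount_singleton (cs : List Char) : PySem.Chars.count cs ['J'] = cs.count 'J' := by
  have : PySem.Chars.count cs ['J'] = PySem.Chars.count.go ['J'] cs.length cs 0 := by
    simp [PySem.Chars.count]
  rw [this, pvCount_go_singleton cs cs.length 0 (le_refl _)]
  omega

theorem pvFill_nil (cs : List Char) : pvFill cs [] = cs := by
  induction cs with
  | nil => rfl
  | cons a t ih => by_cases h : a = 'J' <;> simp [pvFill, h, ih]

theorem pvFill_replace1 (c : Char) (hc : c ≠ 'J') :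
    ∀ (cs : List Char), 'J' ∈ cs → ∀ combo, pvFill (pvReplace1 c cs) combo = pvFill cs (c :: combo) := by
  intro cs
  induction cs with
  | nil => intro h; cases h
  | cons a t ih =>
    intro hm combo
    by_cases ha : a = 'J'
    · subst ha
      simp [pvReplace1, pvFill, hc]
    · have hmt : 'J' ∈ t := by
        rcases List.mem_cons.mp hm with h | h
        · exact absurd h.symm ha
        · exact h
      simp [pvReplace1, pvFill, ha, ih hmt combo]

theorem pvReplace1_count (c : Char) (cs : List Char) (hm : 'J' ∈ cs) (hc : c ≠ 'J') :
    (pvReplace1 c cs).count 'J' = cs.count 'J' - 1 := by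
  induction cs with
  | nil => cases hm
  | cons a t ih =>
    by_cases ha : a = 'J'
    · subst ha
      simp [pvReplace1, hc]
    · rcases List.mem_cons.mp hm with h | h
      · exact absurd h.symm ha
      · have hpos : 0 < t.count 'J' := List.count_pos_iff.mpr h
        simp [pvReplace1, ha, ih h]

theorem pvReplace1_length (c : Char) (cs : List Char) :
    (pvReplace1 c cs).length = cs.length := by
  induction cs with
  | nil => rfl
  | cons a t ih => by_cases h : a = 'J' <;> simp [pvReplace1, h, ih]

theorem pvSet_length_perm (l l' : List Char) (h : l.Perm l') :
    (PySem.Set.ofList l).length = (PySem.Set.ofList l').length := by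
  have hp : (PySem.Set.ofList l).Perm (PySem.Set.ofList l') := by
    rw [List.perm_ext_iff_of_nodup (PySem.Set.nodup_ofList l) (PySem.Set.nodup_ofList l')]
    intro a
    rw [PySem.Set.mem_ofList, PySem.Set.mem_ofList]
    exact h.mem_iff
  exact hp.length_eq

theorem pvGp1_eq (cs : List Char) (hne : cs ≠ []) : pvGp1 cs = pvGp1Alt cs := by
  obtain ⟨a, t, rfl⟩ := List.exists_cons_of_ne_nil hne
  unfold pvGp1 pvGp1Alt
  rw [PySem.List.pyGet?_zero_cons]
  by_cases h5 : (a :: t).count a = 5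
  · simp [h5]
  · simp only [h5, if_false]
    rcases hs : PySem.List.sorted (a :: t) (fun c => (a :: t).count c) true with _ | ⟨m, r⟩
    · exfalso
      have hl := PySem.List.length_sorted (a :: t) (fun c => (a :: t).count c) true
      rw [hs] at hl
      simp at hl
    · have hperm : (m :: r).Perm (a :: t) := by
        rw [← hs]; exact PySem.List.sorted_perm _ _ _
      have hmem : m ∈ (a :: t) := hperm.mem_iff.mp List.mem_cons_self
      have hcnt : (m :: r).count m = (a :: t).count m := hperm.count_eq m
      have hmax : ∀ y ∈ (a :: t), (a :: t).count y ≤ (a :: t).count m :=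
        PySem.List.key_head_sorted_rev_ge _ _ hs
      have hMv : (PySem.List.max? ((a :: t).map fun c => ((a :: t).count c : Int)) (fun x => x))
          = some (((a :: t).count m : Int)) := by
        rcases hM : PySem.List.max? ((a :: t).map fun c => ((a :: t).count c : Int)) (fun x => x) with _ | v
        · rw [PySem.List.max?_eq_none_iff] at hM
          simp at hM
        · have hvmem := PySem.List.max?_mem hM
          have hvmax := PySem.List.max?_isMax hM
          obtain ⟨c₁, hc₁, rfl⟩ := List.mem_map.mp hvmem
          have h1 : ((a :: t).count c₁ : Int) ≤ ((a :: t).count m : Int) := by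
            exact_mod_cast hmax c₁ hc₁
          have h2 : ((a :: t).count m : Int) ≤ ((a :: t).count c₁ : Int) :=
            hvmax _ (List.mem_map_of_mem hmem)
          have : ((a :: t).count c₁ : Int) = ((a :: t).count m : Int) := le_antisymm h1 h2
          rw [this]
      rw [hMv]
      dsimp only
      have hd : (PySem.Set.ofList (m :: r)).length = (PySem.Set.ofList (a :: t)).length :=
        pvSet_length_perm _ _ hperm
      rw [hcnt, hd]
      simp only [Option.getD_some]
      generalize (a :: t).count m = n
      generalize (PySem.Set.ofList (a :: t)).length = d
      have e4 : ((n : Int) = 4) ↔ (n = 4) := by omega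
      have e3 : ((n : Int) = 3) ↔ (n = 3) := by omega
      have e2 : ((n : Int) = 2) ↔ (n = 2) := by omega
      simp only [e4, e3, e2]

theorem pvFoldl_append_attach (l : List Char) (f : Char → List Int) :
    l.attach.foldl (fun pts c => pts ++ f c.val) [] = l.flatMap f := by
  have h1 : l.attach.foldl (fun pts c => pts ++ f c.val) []
      = (l.attach.map Subtype.val).foldl (fun pts c => pts ++ f c) [] := by
    rw [List.foldl_map]
  rw [h1, List.attach_map_subtype_val]
  exact (PySem.List.foldl_append_eq_flatMap f l []).trans (by simp)

theorem pvGo_eq_aux : ∀ (n : Nat) (cs : List Char), cs.count 'J' = n → cs ≠ [] →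
    pvGo cs = (pvProduct pvCardsB n).map fun combo => pvGp1Alt (pvFill cs combo) := by
  intro n
  induction n using Nat.strong_induction_on with
  | _ n ih =>
    intro cs hcount hne
    rw [pvGo]
    by_cases hJ : PySem.Chars.isIn ['J'] cs = true
    · rw [dif_pos hJ]
      have hmem : 'J' ∈ cs :=
        (List.singleton_infix_iff _ _).mp ((PySem.Chars.isIn_iff_infix _ _).mp hJ)
      have hpos : 0 < cs.count 'J' := List.count_pos_iff.mpr hmem
      cases n with
      | zero => omega
      | succ k =>
        have hfold := pvFoldl_append_attach pvCards (fun x => pvGo (pvReplace1 x cs))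
        rw [hfold, pvProduct, List.map_flatMap]
        have hBA : pvCards = pvCardsB := rfl
        rw [hBA]
        apply List.flatMap_congr
        intro c hcmem
        have hc : c ≠ 'J' := pvCards_ne_J c (by rw [hBA]; exact hcmem)
        have hcnt' : (pvReplace1 c cs).count 'J' = k := by
          rw [pvReplace1_count c cs hmem hc, hcount]
          omega
        have hne' : pvReplace1 c cs ≠ [] := by
          intro h
          have := pvReplace1_length c cs
          rw [h] at this
          simp at this
          exact hne (List.eq_nil_of_length_eq_zero (by omega))
        rw [ih k (by omega) (pvReplace1 c cs) hcnt' hne', List.map_map]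
        apply List.map_congr_left
        intro combo _
        simp only [Function.comp]
        rw [pvFill_replace1 c hc cs hmem combo]
    · rw [dif_neg hJ]
      have hnotmem : 'J' ∉ cs := fun hm =>
        hJ ((PySem.Chars.isIn_iff_infix _ _).mpr ((List.singleton_infix_iff _ _).mpr hm))
      have h0 : n = 0 := by
        rw [← hcount]
        exact List.count_eq_zero.mpr hnotmem
      subst h0
      simp [pvProduct, pvFill_nil, pvGp1_eq cs hne]

-- ===== VERDICT (by name: the statement is the Claim_ definition above) =====
theorem get_points2_spec : Claim_equal_get_points2 := by
  intro hand _ hpre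
  unfold Spec_get_points2 get_points2 get_points2_alt
  have hne : hand.toList ≠ [] := by
    intro h
    exact hpre (String.toList_eq_nil_iff.mp h)
  rw [pvCount_singleton]
  exact pvGo_eq_aux _ hand.toList rfl hne
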